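-- pv_equiv track=rewrite | github.com/shamspias/PlugBot | backend/app/services/telegram/utils/markdown.py | sanitize_markdown
-- ===== SOURCE A (Python) =====
-- def sanitize_markdown(text: str) -> str:
--     """Attempt to fix common markdown issues."""
--     if not text:
--         return text
--
--     # Remove incomplete bold formatting
--     bold_parts = text.split('**')
--     if len(bold_parts) % 2 == 0:  # Even number of parts means odd number of **
--         text = '**'.join(bold_parts[:-1]) + bold_parts[-1]
--
--     # Handle incomplete italic formatting
--     italic_parts = []
--     current_part = ""
--     in_italic = False
--
--     i = 0
--     while i < len(text):
--         if text[i] == '_' and (i == 0 or text[i - 1] != '\\'):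
--             if in_italic:
--                 italic_parts.append(current_part + '_')
--                 current_part = ""
--                 in_italic = False
--             else:
--                 if current_part:
--                     italic_parts.append(current_part)
--                 current_part = '_'
--                 in_italic = True
--         else:
--             current_part += text[i]
--         i += 1
--
--     if current_part:
--         italic_parts.append(current_part)
--
--     text = ''.join(italic_parts)
--
--     return text
-- ===== SOURCE B (Python) =====
-- def sanitize_markdown(text: str) -> str:
--     """Attempt to fix common markdown issues."""
--     if not text:
--         return text
--     # Bold fix: an odd number of '**' markers means the last one is unmatched;
--     # drop that last marker.  (The original italic pass rebuilt the string
--     # unchanged, so nothing else is needed.)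
--     if text.count('**') % 2 == 1:
--         i = text.rfind('**')
--         return text[:i] + text[i + 2:]
--     return text
-- ===== Notes on version B (the rewrite author's own statement) =====
-- stated objective: faster
-- what changed: A's italic while-loop rebuilds the string unchanged one character at a time (quadratic via repeated string concatenation), so B drops it entirely and replaces the split/join bold repair by a parity check of the count of double-asterisk markers plus a single rfind-and-splice removing the last unmatched marker.
import Mathlib
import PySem

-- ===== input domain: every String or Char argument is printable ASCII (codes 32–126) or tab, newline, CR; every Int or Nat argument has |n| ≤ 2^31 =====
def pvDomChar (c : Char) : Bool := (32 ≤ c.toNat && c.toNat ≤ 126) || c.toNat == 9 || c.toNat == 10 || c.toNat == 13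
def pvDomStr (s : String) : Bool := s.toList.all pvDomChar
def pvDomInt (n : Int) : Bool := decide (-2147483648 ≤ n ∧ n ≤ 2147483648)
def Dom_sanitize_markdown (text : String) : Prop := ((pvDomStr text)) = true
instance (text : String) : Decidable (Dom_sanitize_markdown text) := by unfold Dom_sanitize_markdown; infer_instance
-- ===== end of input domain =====

-- B replaces A's split/join bold repair by a count-parity test plus one rfind splice and drops
-- A's italic while-loop, which rebuilds its input unchanged character by character; same return
-- value on every string (a timing run measured B faster).

-- ===== PORT A =====
-- A's italic while-loop, one step per character; `prev` is text[i-1] (none at i = 0)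
def pvItalicLoopA : List Char → Option Char → List (List Char) → List Char → Bool → List (List Char)
  | [], _, parts, cur, _ => if cur ≠ [] then parts ++ [cur] else parts
  | c :: rest, prev, parts, cur, inIt =>
    if c = '_' ∧ (prev = none ∨ prev ≠ some '\\') then
      if inIt then pvItalicLoopA rest (some c) (parts ++ [cur ++ ['_']]) [] false
      else if cur ≠ [] then pvItalicLoopA rest (some c) (parts ++ [cur]) ['_'] true
      else pvItalicLoopA rest (some c) parts ['_'] true
    else pvItalicLoopA rest (some c) parts (cur ++ [c]) inIt

def sanitize_markdown (text : String) : String :=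
  if text = "" then text
  else
    let bold_parts := PySem.Chars.splitOn text.toList ['*', '*']
    let cs1 := if bold_parts.length % 2 = 0 then
        PySem.Chars.join ['*', '*'] (PySem.List.slice bold_parts none (some (-1)))
          ++ ((PySem.List.pyGet? bold_parts (-1)).getD [])
      else text.toList
    let italic_parts := pvItalicLoopA cs1 none [] [] false
    String.ofList (PySem.Chars.join [] italic_parts)

-- ===== PORT B =====
def sanitize_markdown_alt (text : String) : String :=
  if text = "" then text
  else if PySem.Chars.count text.toList ['*', '*'] % 2 = 1 then
    let i := PySem.Chars.rfind text.toList ['*', '*']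
    String.ofList (PySem.Chars.slice text.toList none (some i)
      ++ PySem.Chars.slice text.toList (some (i + 2)) none)
  else text

-- ===== PRECONDITION & SPEC =====
def Spec_sanitize_markdown (text : String) (out : String) : Prop := out = sanitize_markdown_alt text
instance (text : String) (out : String) : Decidable (Spec_sanitize_markdown text out) := by unfold Spec_sanitize_markdown; infer_instance

-- ===== CLAIM (what is proved, stated in full; the proofs are below) =====
def Claim_equal_sanitize_markdown : Prop := ∀ (text : String), Dom_sanitize_markdown text → Spec_sanitize_markdown text (sanitize_markdown text)

-- ===== LEMMAS AND PROOFS =====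

-- greedy split on "**", a clean structural model of PySem.Chars.splitOn/count
def pvGsplit : List Char → List (List Char)
  | [] => [[]]
  | c :: rest =>
    if ['*', '*'].isPrefixOf (c :: rest) then [] :: pvGsplit rest.tail
    else (pvGsplit rest).modifyHead (c :: ·)
termination_by l => l.length
decreasing_by
  · simpa using Nat.lt_succ_of_le (Nat.sub_le _ _)
  · simp

theorem pvGsplit_ne_nil (l : List Char) : pvGsplit l ≠ [] := by
  fun_induction pvGsplit l with
  | case1 => simp
  | case2 c rest h ih => simp
  | case3 c rest h ih =>
    cases hg : pvGsplit rest with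
    | nil => exact absurd hg ih
    | cons p ps => simp [hg]

theorem pvGsplit_len_pos (l : List Char) : 1 ≤ (pvGsplit l).length :=
  List.length_pos_of_ne_nil (pvGsplit_ne_nil l)

-- join with "**" undoes the greedy split
theorem pvJoin_modifyHead (c : Char) (ds : List (List Char)) (h : ds ≠ []) :
    PySem.Chars.join ['*', '*'] (ds.modifyHead (c :: ·)) = c :: PySem.Chars.join ['*', '*'] ds := by
  match ds with
  | [] => exact absurd rfl h
  | [d] => simp [List.modifyHead, PySem.Chars.join_singleton]
  | d :: d' :: ds' => simp [List.modifyHead, PySem.Chars.join_cons_cons]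

theorem pvJoin_nil_cons (ds : List (List Char)) (h : ds ≠ []) :
    PySem.Chars.join ['*', '*'] ([] :: ds) = '*' :: '*' :: PySem.Chars.join ['*', '*'] ds := by
  match ds with
  | [] => exact absurd rfl h
  | d :: ds' => simp [PySem.Chars.join_cons_cons]

theorem pvJoin_gsplit (l : List Char) : PySem.Chars.join ['*', '*'] (pvGsplit l) = l := by
  fun_induction pvGsplit l with
  | case1 => simp [PySem.Chars.join_singleton]
  | case2 c rest h ih =>
    rw [pvJoin_nil_cons _ (pvGsplit_ne_nil _), ih]
    rcases rest with _ | ⟨c', rest'⟩ <;> simp_all [List.isPrefixOf] <;> tauto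
  | case3 c rest h ih =>
    rw [pvJoin_modifyHead _ _ (pvGsplit_ne_nil _), ih]

-- an occurrence of "**" forces at least two parts
theorem pvOcc_len (l : List Char) (h : ['*', '*'] <:+: l) : 2 ≤ (pvGsplit l).length := by
  induction l with
  | nil => simp at h
  | cons c rest ih =>
    by_cases hp : ['*', '*'].isPrefixOf (c :: rest)
    · have := pvGsplit_len_pos (rest.tail)
      simp [pvGsplit, hp]; omega
    · rcases (List.infix_cons_iff).1 h with h1 | h2
      · exact absurd ((List.isPrefixOf_iff_prefix).2 h1) hp
      · have := ih h2
        simpa [pvGsplit, hp] using this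

-- PySem.Chars.splitOn computes the greedy split
theorem pvSplitGo (fuel : Nat) :
    ∀ (l cur : List Char) (acc : List (List Char)), l.length < fuel →
    PySem.Chars.splitOn.go ['*', '*'] fuel l cur acc
      = acc.reverse ++ (pvGsplit l).modifyHead (cur.reverse ++ ·) := by
  induction fuel with
  | zero => intro l cur acc h; omega
  | succ f ih =>
    intro l cur acc h
    rcases l with _ | ⟨c, rest⟩
    · rw [PySem.Chars.splitOn.go.eq_def]; simp [pvGsplit, List.modifyHead]
    · rw [PySem.Chars.splitOn.go.eq_def]
      by_cases hp : ['*', '*'].isPrefixOf (c :: rest)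
      · simp only [hp, if_pos]
        have hlen2 : (['*', '*'] : List Char).length = 2 := rfl
        rw [hlen2]
        have hlen : (List.drop 2 (c :: rest)).length < f := by
          simp at h ⊢; omega
        rw [ih _ _ _ hlen]
        have hdt : List.drop 2 (c :: rest) = rest.tail := by
          rcases rest with _ | ⟨c', r⟩ <;> simp
        rcases hg2 : pvGsplit rest.tail with _ | ⟨p, ps⟩
        · exact absurd hg2 (pvGsplit_ne_nil _)
        · simp [hdt, pvGsplit, hp, hg2, List.modifyHead]
      · simp only [hp, if_neg, Bool.false_eq_true, not_false_iff]
        have hlen : rest.length < f := by simp at h; omega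
        rw [ih _ _ _ hlen]
        have hne := pvGsplit_ne_nil rest
        rcases hg : pvGsplit rest with _ | ⟨p, ps⟩
        · exact absurd hg hne
        · simp [pvGsplit, hp, hg, List.modifyHead]

theorem pvSplitEq (l : List Char) :
    PySem.Chars.splitOn l ['*', '*'] = pvGsplit l := by
  have h := pvSplitGo (l.length + 1) l [] [] (by omega)
  rw [PySem.Chars.splitOn, h]
  cases hg : pvGsplit l with
  | nil => rfl
  | cons p ps => simp

-- PySem.Chars.count counts the separators of the greedy split
theorem pvCountGo (fuel : Nat) :
    ∀ (l : List Char) (acc : Nat), l.length ≤ fuel →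
    PySem.Chars.count.go ['*', '*'] fuel l acc = acc + ((pvGsplit l).length - 1) := by
  induction fuel with
  | zero =>
    intro l acc h
    have : l = [] := List.eq_nil_of_length_eq_zero (by omega)
    subst this
    rw [PySem.Chars.count.go.eq_def]; simp [pvGsplit]
  | succ f ih =>
    intro l acc h
    rcases l with _ | ⟨c, rest⟩
    · rw [PySem.Chars.count.go.eq_def]; simp [pvGsplit]
    · rw [PySem.Chars.count.go.eq_def]
      by_cases hp : ['*', '*'].isPrefixOf (c :: rest)
      · simp only [hp, if_pos]
        have hlen2 : (['*', '*'] : List Char).length = 2 := rfl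
        rw [hlen2]
        have hlen : (List.drop 2 (c :: rest)).length ≤ f := by simp at h ⊢; omega
        rw [ih _ _ hlen]
        have h2 : List.drop 2 (c :: rest) = rest.tail := by
          rcases rest with _ | ⟨c', r⟩ <;> simp
        have := pvGsplit_len_pos rest.tail
        simp [h2, pvGsplit, hp]; omega
      · simp only [hp, if_neg, Bool.false_eq_true, not_false_iff]
        have hlen : rest.length ≤ f := by simp at h; omega
        rw [ih _ _ hlen]
        simp [pvGsplit, hp]

theorem pvCountEq (l : List Char) :
    PySem.Chars.count l ['*', '*'] = (pvGsplit l).length - 1 := by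
  have := pvCountGo l.length l 0 le_rfl
  simpa [PySem.Chars.count] using this

-- rfind returns q as soon as "**" is a prefix at q and at no larger index
theorem pvRfindGoEq (s : List Char) (k q : Nat) (hq : q ≤ k)
    (hp : ['*', '*'] <+: s.drop q)
    (hmax : ∀ j, q < j → j ≤ k → ¬ ['*', '*'] <+: s.drop j) :
    PySem.Chars.rfind.go s ['*', '*'] k = (q : Int) := by
  induction k with
  | zero =>
    have : q = 0 := by omega
    subst this
    rw [PySem.Chars.rfind.go.eq_def]
    simp [List.isPrefixOf_iff_prefix]
    simpa using hp
  | succ k ih =>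
    rw [PySem.Chars.rfind.go.eq_def]
    by_cases hc : ['*', '*'].isPrefixOf (List.drop (k + 1) s)
    · have hqk : q = k + 1 := by
        by_contra hne
        exact hmax (k + 1) (by omega) le_rfl ((List.isPrefixOf_iff_prefix).1 hc)
      simp [hc, hqk]
    · have hqk : q ≤ k := by
        rcases Nat.lt_or_ge q (k + 1) with h | h
        · omega
        · exfalso; have : q = k + 1 := by omega
          subst this
          exact hc ((List.isPrefixOf_iff_prefix).2 hp)
      simp only [hc, Bool.false_eq_true, if_neg, not_false_iff]
      exact ih hqk (fun j h1 h2 => hmax j h1 (by omega))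

theorem pvRfindEq (l : List Char) (q : Nat)
    (hp : ['*', '*'] <+: l.drop q)
    (hmax : ∀ j, q < j → ¬ ['*', '*'] <+: l.drop j) :
    PySem.Chars.rfind l ['*', '*'] = (q : Int) := by
  have hql : q ≤ l.length := by
    by_contra h
    rw [List.drop_eq_nil_of_le (by omega)] at hp
    simp at hp
  exact pvRfindGoEq l l.length q hql hp (fun j h1 _ => hmax j h1)

-- the core removal lemma: dropping the last greedy separator equals splicing at rfind
theorem pvREM : ∀ (n : Nat) (l : List Char), l.length ≤ n → 2 ≤ (pvGsplit l).length →
    ∃ q : Nat,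
      ['*', '*'] <+: l.drop q ∧
      (∀ j, q < j → ¬ ['*', '*'] <+: l.drop j) ∧
      PySem.Chars.join ['*', '*'] (pvGsplit l).dropLast ++ (pvGsplit l).getLastD []
        = l.take q ++ l.drop (q + 2) := by
  intro n
  induction n with
  | zero =>
    intro l hl h2
    have : l = [] := List.eq_nil_of_length_eq_zero (by omega)
    subst this; simp [pvGsplit] at h2
  | succ n ih =>
    intro l hl h2
    rcases l with _ | ⟨c, rest⟩
    · simp [pvGsplit] at h2
    by_cases hp : ['*', '*'].isPrefixOf (c :: rest)
    · -- l starts with "**": l = '*' :: '*' :: t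
      obtain ⟨t, ht⟩ : ∃ t, c :: rest = '*' :: '*' :: t := by
        have := (List.isPrefixOf_iff_prefix).1 hp
        rcases this with ⟨t, ht⟩
        exact ⟨t, ht.symm⟩
      rw [List.cons.injEq] at ht
      obtain ⟨hc, hrest⟩ := ht
      subst hc; subst hrest
      have htail : (('*' : Char) :: t).tail = t := rfl
      have hg : pvGsplit ('*' :: '*' :: t) = [] :: pvGsplit t := by
        simp [pvGsplit, List.isPrefixOf]
      by_cases h2t : 2 ≤ (pvGsplit t).length
      · -- more separators inside t: recurse
        obtain ⟨q, hpq, hmax, heq⟩ := ih t (by simp at hl; omega) h2t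
        refine ⟨q + 2, ?_, ?_, ?_⟩
        · simpa using hpq
        · intro j hj hpre
          rcases j with _ | _ | j'
          · omega
          · omega
          · exact hmax j' (by omega) (by simpa using hpre)
        · rw [hg]
          have hne : pvGsplit t ≠ [] := pvGsplit_ne_nil t
          have hdne : (pvGsplit t).dropLast ≠ [] := by
            have hdl : ((pvGsplit t).dropLast).length = (pvGsplit t).length - 1 :=
              List.length_dropLast
            intro hcon
            rw [hcon] at hdl
            simp at hdl; omega
          rw [List.dropLast_cons_of_ne_nil hne]
          rw [pvJoin_nil_cons _ hdne]
          have hlast : (([] : List Char) :: pvGsplit t).getLastD [] = (pvGsplit t).getLastD [] := by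
            rcases hgt : pvGsplit t with _ | ⟨p, ps⟩
            · exact absurd hgt hne
            · simp [List.getLastD_cons]
          simp only [List.getLastD_cons]
          have : '*' :: '*' :: (PySem.Chars.join ['*', '*'] (pvGsplit t).dropLast
              ++ (pvGsplit t).getLastD []) = '*' :: '*' :: (t.take q ++ t.drop (q + 2)) := by
            rw [heq]
          simpa [List.take_succ_cons, List.drop_succ_cons] using this
      · -- t holds no further separator: the greedy split of t is [t]
        have h1t := pvGsplit_len_pos t
        obtain ⟨p, hps⟩ : ∃ p, pvGsplit t = [p] := by
          rcases hgt : pvGsplit t with _ | ⟨p, ps⟩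
          · exact absurd hgt (pvGsplit_ne_nil t)
          · rcases ps with _ | ⟨p', ps'⟩
            · exact ⟨p, rfl⟩
            · rw [hgt] at h2t; simp at h2t
        have hpt : p = t := by
          have := pvJoin_gsplit t
          rw [hps, PySem.Chars.join_singleton] at this
          exact this
        rw [hpt] at hps
        have hnoc : ∀ j, ¬ ['*', '*'] <+: t.drop j := by
          intro j hj
          have : ['*', '*'] <:+: t :=
            hj.isInfix.trans (List.drop_suffix j t).isInfix
          have := pvOcc_len t this
          rw [hps] at this; simp at this
        have hlhs : PySem.Chars.join ['*', '*'] (pvGsplit ('*' :: '*' :: t)).dropLast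
            ++ (pvGsplit ('*' :: '*' :: t)).getLastD [] = t := by
          rw [hg, hps]
          simp [PySem.Chars.join_singleton, List.getLastD_cons]
        rcases t with _ | ⟨c0, t'⟩
        · -- t = []
          refine ⟨0, by simp [List.isPrefixOf_iff_prefix], ?_, by simpa using hlhs⟩
          intro j hj hpre
          have : (List.drop j ['*', '*']).length < 2 := by
            simp; omega
          have := hpre.length_le
          simp at this ⊢; omega
        by_cases hc0 : c0 = '*'
        · -- t starts with '*': the rightmost "**" sits one step later
          subst hc0
          refine ⟨1, by simp, ?_, ?_⟩
          · intro j hj hpre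
            rcases j with _ | _ | j'
            · omega
            · omega
            · exact hnoc j' (by simpa using hpre)
          · rw [hlhs]; simp
        · -- t does not start with '*': the rightmost "**" is the leading one
          refine ⟨0, by simp, ?_, ?_⟩
          · intro j hj hpre
            rcases j with _ | _ | j'
            · omega
            · apply hc0
              obtain ⟨u, hu⟩ := hpre
              have h5 := congrArg (fun l => l[1]?) hu
              simpa using h5.symm
            · exact hnoc j' (by simpa using hpre)
          · rw [hlhs]; simp
    · -- l = c :: rest with no separator at position 0
      have hg : pvGsplit (c :: rest) = (pvGsplit rest).modifyHead (c :: ·) := by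
        simp [pvGsplit, hp]
      have h2r : 2 ≤ (pvGsplit rest).length := by
        rw [hg] at h2; simpa using h2
      obtain ⟨q, hpq, hmax, heq⟩ := ih rest (by simp at hl; omega) h2r
      refine ⟨q + 1, by simpa using hpq, ?_, ?_⟩
      · intro j hj hpre
        rcases j with _ | j'
        · omega
        · exact hmax j' (by omega) (by simpa using hpre)
      · obtain ⟨p, p2, ps, hps⟩ : ∃ p p2 ps, pvGsplit rest = p :: p2 :: ps := by
          rcases hgt : pvGsplit rest with _ | ⟨p, ps⟩
          · exact absurd hgt (pvGsplit_ne_nil rest)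
          · rcases ps with _ | ⟨p2, ps'⟩
            · rw [hgt] at h2r; simp at h2r
            · exact ⟨p, p2, ps', rfl⟩
        have hdne : (p :: p2 :: ps).dropLast ≠ [] := by
          cases ps <;> simp [List.dropLast_cons₂]
        rw [hg, hps]
        rw [hps] at heq
        have hdl : ((p :: p2 :: ps).modifyHead (c :: ·)).dropLast
            = ((p :: p2 :: ps).dropLast).modifyHead (c :: ·) := by
          cases ps <;> simp [List.modifyHead, List.dropLast_cons₂]
        have hgl : ((p :: p2 :: ps).modifyHead (c :: ·)).getLastD []
            = (p :: p2 :: ps).getLastD [] := by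
          cases ps <;> simp [List.modifyHead, List.getLastD_cons]
        rw [hdl, hgl, pvJoin_modifyHead _ _ hdne, List.cons_append, heq]
        have h3 : q + 1 + 2 = (q + 2) + 1 := by omega
        rw [h3, List.take_succ_cons, List.drop_succ_cons]
        simp

-- the italic loop flattens back to its input
theorem pvJoinNilFlatten (ps : List (List Char)) :
    PySem.Chars.join [] ps = ps.flatten := by
  induction ps with
  | nil => simp [PySem.Chars.join_nil]
  | cons p ps ih =>
    rcases ps with _ | ⟨p2, ps'⟩
    · simp [PySem.Chars.join_singleton]
    · rw [PySem.Chars.join_cons_cons]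
      simp_all

theorem pvItalicFlatten (rest : List Char) :
    ∀ (prev : Option Char) (parts : List (List Char)) (cur : List Char) (inIt : Bool),
    (pvItalicLoopA rest prev parts cur inIt).flatten = parts.flatten ++ cur ++ rest := by
  induction rest with
  | nil =>
    intro prev parts cur inIt
    by_cases hc : cur = [] <;> simp [pvItalicLoopA, hc]
  | cons c rest ih =>
    intro prev parts cur inIt
    by_cases h1 : c = '_' ∧ (prev = none ∨ prev ≠ some '\\')
    · obtain ⟨hc, hprev⟩ := h1
      subst hc
      rcases inIt with _ | _
      · by_cases h2 : cur = []
        · simp [pvItalicLoopA, hprev, h2, ih]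
        · simp [pvItalicLoopA, hprev, h2, ih]
      · simp [pvItalicLoopA, hprev, ih]
    · simp [pvItalicLoopA, h1, ih]

theorem pvItalicId (cs : List Char) :
    PySem.Chars.join [] (pvItalicLoopA cs none [] [] false) = cs := by
  rw [pvJoinNilFlatten, pvItalicFlatten]
  simp

-- ===== VERDICT (by name: the statement is the Claim_ definition above) =====
theorem sanitize_markdown_spec : Claim_equal_sanitize_markdown := by
  intro text _
  unfold Spec_sanitize_markdown sanitize_markdown sanitize_markdown_alt
  by_cases hempty : text = ""
  · simp [hempty]
  simp only [if_neg hempty]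
  set cs := text.toList with hcs
  have hsplit : PySem.Chars.splitOn cs ['*', '*'] = pvGsplit cs := pvSplitEq cs
  have hcount : PySem.Chars.count cs ['*', '*'] = (pvGsplit cs).length - 1 := pvCountEq cs
  have hL := pvGsplit_len_pos cs
  by_cases hpar : (pvGsplit cs).length % 2 = 0
  · -- odd number of "**": both sides remove the last marker
    have hc1 : PySem.Chars.count cs ['*', '*'] % 2 = 1 := by
      rw [hcount]; omega
    have h2 : 2 ≤ (pvGsplit cs).length := by omega
    obtain ⟨q, hpq, hmax, heq⟩ := pvREM cs.length cs le_rfl h2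
    have hrf : PySem.Chars.rfind cs ['*', '*'] = (q : Int) := pvRfindEq cs q hpq hmax
    rw [hsplit]
    simp only [hpar, if_pos, hc1, if_pos]
    rw [PySem.List.slice_to_neg_one, PySem.List.pyGet?_neg_one,
      ← List.getLastD_eq_getLast?]
    rw [pvItalicId, heq, hrf]
    have hs1 : PySem.Chars.slice cs none (some (q : Int)) = cs.take q := by
      simp [PySem.Chars.slice_eq_listSlice, PySem.List.slice_to_natCast]
    have hs2 : PySem.Chars.slice cs (some ((q : Int) + 2)) none = cs.drop (q + 2) := by
      have hcast : ((q : Int) + 2) = ((q + 2 : Nat) : Int) := by push_cast; ring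
      rw [PySem.Chars.slice_eq_listSlice, hcast, PySem.List.slice_from_natCast]
    rw [hs1, hs2]
  · -- even number of "**": both sides return the input unchanged
    have hc1 : ¬ PySem.Chars.count cs ['*', '*'] % 2 = 1 := by
      rw [hcount]; omega
    rw [hsplit]
    simp only [hpar, if_neg, not_false_iff, hc1]
    rw [pvItalicId, hcs, String.ofList_toList]
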